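-- pv_equiv track=rewrite | github.com/rmnkmch/ChainsOfEducation | ChainsOfEducation/SIPK.py | sipk5_bin_str_to_polinom_list
-- ===== SOURCE A (Python) =====
-- def sipk5_bin_str_to_polinom_list(bin_str: str):
--     ret_list = []
--     lb = len(bin_str)
--     for i in range(lb):
--         if bin_str[i] == "1":
--             if i == lb - 1: ret_list.append(r"1")
--             elif i == lb - 2: ret_list.append(r"x")
--             else: ret_list.append(r"x^{" + str(lb - i - 1) + r"}")
--         else:
--             if i == lb - 1 and len(ret_list) == 0: ret_list.append(r"0")
--     return ret_list
-- ===== SOURCE B (Python) =====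
-- def sipk5_bin_str_to_polinom_list(bin_str: str):
--     # Stage 1: encode the string as an integer bitmask (any char other than '1' is a 0-bit).
--     n = 0
--     for c in bin_str:
--         n = 2 * n + (1 if c == "1" else 0)
--     # Stage 2: peel set bits from the top; the bit position is the exponent.
--     out = []
--     while n:
--         exp = n.bit_length() - 1
--         if exp == 0:
--             out.append("1")
--         elif exp == 1:
--             out.append("x")
--         else:
--             out.append("x^{" + str(exp) + "}")
--         n -= 1 << exp
--     if not out and bin_str:
--         out.append("0")
--     return out
-- ===== Notes on version B (the rewrite author's own statement) =====
-- stated objective: alternative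
-- what changed: B encodes the string into an integer bitmask (n = 2*n + bit per char) and then generates the term list by repeatedly extracting the highest set bit via bit_length, mapping each bit position to its term, with the all-zeros guard outside the loops; A instead builds the list during one indexed scan with exponent lb-i-1 and an interleaved last-index zero-guard.
import Mathlib
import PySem

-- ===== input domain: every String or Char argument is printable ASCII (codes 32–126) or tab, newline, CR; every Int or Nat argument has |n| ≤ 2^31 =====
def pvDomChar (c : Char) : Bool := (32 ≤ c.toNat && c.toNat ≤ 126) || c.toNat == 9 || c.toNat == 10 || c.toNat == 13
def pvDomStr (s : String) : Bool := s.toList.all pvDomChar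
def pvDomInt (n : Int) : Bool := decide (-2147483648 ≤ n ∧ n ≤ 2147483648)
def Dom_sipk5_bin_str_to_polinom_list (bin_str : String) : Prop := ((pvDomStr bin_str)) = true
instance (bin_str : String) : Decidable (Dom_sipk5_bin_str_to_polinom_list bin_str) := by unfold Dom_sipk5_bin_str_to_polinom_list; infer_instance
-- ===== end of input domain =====

-- B uses a different algorithm: it encodes the string into an integer bitmask and then
-- generates terms by repeatedly extracting the highest set bit (bit_length), instead of
-- A's indexed scan with an interleaved zero-guard; objective: alternative (same cost).

-- ===== PORT A =====
-- Literal port of A: ascending index loop over range(len), exponent lb-i-1,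
-- zero-guard interleaved at the last index when the accumulator is still empty.
def sipk5_bin_str_to_polinom_list (bin_str : String) : List String :=
  let cs := bin_str.toList
  let lb := cs.length
  (List.range lb).foldl (fun ret i =>
    if cs.getD i ' ' = '1' then
      if i = lb - 1 then ret ++ ["1"]
      else if i = lb - 2 then ret ++ ["x"]
      else ret ++ ["x^{" ++ PySem.Int.toStr (Int.ofNat (lb - i - 1)) ++ "}"]
    else
      if i = lb - 1 ∧ ret.length = 0 then ret ++ ["0"] else ret) []

-- ===== PORT B =====
-- stage 1 of Source B: n = 2*n + (1 if c == "1" else 0) over the chars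
def pvValB (cs : List Char) : Nat :=
  cs.foldl (fun n c => 2 * n + (if c = '1' then 1 else 0)) 0

-- stage 2 of Source B: while n: exp = n.bit_length()-1; append term; n -= 1 << exp.
-- (Python's n.bit_length()-1 for n > 0 is Nat.log2 n; 1 << exp is 2 ^ exp.)
def pvBitsB (n : Nat) : List String :=
  if h : n = 0 then []
  else
    (if Nat.log2 n = 0 then "1"
     else if Nat.log2 n = 1 then "x"
     else "x^{" ++ PySem.Int.toStr (Int.ofNat (Nat.log2 n)) ++ "}")
      :: pvBitsB (n - 2 ^ Nat.log2 n)
termination_by n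
decreasing_by exact Nat.sub_lt (Nat.pos_of_ne_zero h) (Nat.two_pow_pos _)

def sipk5_bin_str_to_polinom_list_alt (bin_str : String) : List String :=
  let out := pvBitsB (pvValB bin_str.toList)
  if out = [] ∧ bin_str.toList ≠ [] then out ++ ["0"] else out

-- ===== PRECONDITION & SPEC =====
def Spec_sipk5_bin_str_to_polinom_list (bin_str : String) (out : List String) : Prop := out = sipk5_bin_str_to_polinom_list_alt bin_str
instance (bin_str : String) (out : List String) : Decidable (Spec_sipk5_bin_str_to_polinom_list bin_str out) := by unfold Spec_sipk5_bin_str_to_polinom_list; infer_instance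

-- ===== CLAIM (what is proved, stated in full; the proofs are below) =====
def Claim_equal_sipk5_bin_str_to_polinom_list : Prop := ∀ (bin_str : String), Dom_sipk5_bin_str_to_polinom_list bin_str → Spec_sipk5_bin_str_to_polinom_list bin_str (sipk5_bin_str_to_polinom_list bin_str)

-- ===== LEMMAS AND PROOFS =====

-- the term for exponent e (shared normal form for both sides)
def pvTermB (e : Nat) : String :=
  if e = 0 then "1" else if e = 1 then "x"
  else "x^{" ++ PySem.Int.toStr (Int.ofNat e) ++ "}"

-- normal form: descending-exponent term list of a char list (exponent = tail length)
def pvDesc : List Char → List String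
  | [] => []
  | c :: t => (if c = '1' then [pvTermB t.length] else []) ++ pvDesc t

-- recursive (positional) value of a char list as a bitmask
def pvVal' : List Char → Nat
  | [] => 0
  | c :: t => (if c = '1' then 1 else 0) * 2 ^ t.length + pvVal' t

theorem pvVal'_lt (cs : List Char) : pvVal' cs < 2 ^ cs.length := by
  induction cs with
  | nil => simp [pvVal']
  | cons c t ih =>
    simp only [pvVal', List.length_cons, pow_succ]
    split_ifs <;> omega

theorem pvValB_eq (cs : List Char) : ∀ a : Nat,
    cs.foldl (fun n c => 2 * n + (if c = '1' then 1 else 0)) a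
      = a * 2 ^ cs.length + pvVal' cs := by
  induction cs with
  | nil => intro a; simp [pvVal']
  | cons c t ih =>
    intro a
    simp only [List.foldl_cons, pvVal', List.length_cons, pow_succ]
    rw [ih]
    ring

theorem pvBitsB_pos (n : Nat) (h : n ≠ 0) :
    pvBitsB n = pvTermB (Nat.log2 n) :: pvBitsB (n - 2 ^ Nat.log2 n) := by
  rw [pvBitsB]
  simp [h, pvTermB]

theorem pvBitsB_add (k n : Nat) (h : n < 2 ^ k) :
    pvBitsB (2 ^ k + n) = pvTermB k :: pvBitsB n := by
  have hpos : 0 < 2 ^ k := Nat.two_pow_pos k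
  have hlog : Nat.log2 (2 ^ k + n) = k := by
    have h2 : 2 ^ k + n < 2 ^ (k + 1) := by rw [pow_succ]; omega
    exact Nat.log2_eq_iff (by omega) |>.mpr ⟨Nat.le_add_right _ _, h2⟩
  have hne : 2 ^ k + n ≠ 0 := by omega
  rw [pvBitsB_pos _ hne, hlog, Nat.add_sub_cancel_left]

theorem pvBitsB_val (cs : List Char) : pvBitsB (pvVal' cs) = pvDesc cs := by
  induction cs with
  | nil => simp [pvVal', pvDesc, pvBitsB]
  | cons c t ih =>
    by_cases hc : c = '1'
    · subst hc
      simp only [pvVal', pvDesc, if_true, one_mul]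
      rw [pvBitsB_add _ _ (pvVal'_lt t), ih]
      simp
    · simp only [pvVal', pvDesc, if_neg hc, zero_mul, zero_add]
      rw [ih]
      simp

-- A's step function, named for the loop lemma
def pvStepA (cs : List Char) (lb : Nat) (ret : List String) (i : Nat) : List String :=
  if cs.getD i ' ' = '1' then
    if i = lb - 1 then ret ++ ["1"]
    else if i = lb - 2 then ret ++ ["x"]
    else ret ++ ["x^{" ++ PySem.Int.toStr (Int.ofNat (lb - i - 1)) ++ "}"]
  else
    if i = lb - 1 ∧ ret.length = 0 then ret ++ ["0"] else ret

-- invariant of A's loop from index j on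
theorem pvFoldA (cs : List Char) (n : Nat) : ∀ (j : Nat) (ret : List String),
    j + n = cs.length →
    (List.range' j n).foldl (pvStepA cs cs.length) ret =
      if ret = [] ∧ pvDesc (cs.drop j) = [] ∧ j < cs.length then ["0"]
      else ret ++ pvDesc (cs.drop j) := by
  induction n with
  | zero =>
    intro j ret hj
    simp [List.range'] at hj ⊢
    rw [show j = cs.length by omega, List.drop_length]
    simp [pvDesc]
  | succ n ih =>
    intro j ret hj
    have hjlt : j < cs.length := by omega
    have hdrop : cs.drop j = cs[j] :: cs.drop (j + 1) := List.drop_eq_getElem_cons hjlt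
    have hgetD : cs.getD j ' ' = cs[j] := List.getD_eq_getElem cs ' ' hjlt
    have hlen : (cs.drop (j + 1)).length = cs.length - (j + 1) := List.length_drop
    rw [List.range'_succ, List.foldl_cons]
    by_cases hc : cs[j] = '1'
    · -- '1' branch: the appended term is pvTermB of the exponent
      have hterm : pvStepA cs cs.length ret j
          = ret ++ [pvTermB (cs.drop (j + 1)).length] := by
        rw [pvStepA, hgetD, if_pos hc, hlen]
        by_cases h1 : j = cs.length - 1
        · rw [if_pos h1, show cs.length - (j + 1) = 0 by omega]
          simp [pvTermB]
        · rw [if_neg h1]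
          by_cases h2 : j = cs.length - 2
          · rw [if_pos h2, show cs.length - (j + 1) = 1 by omega]
            simp [pvTermB]
          · rw [if_neg h2]
            have hh : cs.length - j - 1 = cs.length - (j + 1) := by omega
            rw [hh]
            simp only [pvTermB, if_neg (by omega : ¬ cs.length - (j + 1) = 0),
              if_neg (by omega : ¬ cs.length - (j + 1) = 1)]
      rw [hterm, ih (j + 1) _ (by omega), hdrop]
      have hne : pvDesc (cs[j] :: cs.drop (j + 1)) ≠ [] := by
        simp [pvDesc, hc]
      rw [if_neg (by simp), if_neg (by intro h; exact hne h.2.1)]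
      simp [pvDesc, hc, List.append_assoc]
    · -- non-'1' branch
      have hdescj : pvDesc (cs.drop j) = pvDesc (cs.drop (j + 1)) := by
        rw [hdrop]; simp [pvDesc, hc]
      by_cases h1 : j = cs.length - 1
      · -- last index: n = 0, loop ends after this step
        have hn : n = 0 := by omega
        have hnil : cs.drop (j + 1) = [] := by
          apply List.drop_eq_nil_of_le; omega
        subst hn
        simp only [List.range', List.foldl_nil]
        rw [pvStepA, hgetD, if_neg hc, hdescj, hnil]
        by_cases hr : ret = []
        · rw [if_pos ⟨h1, by simp [hr]⟩, if_pos ⟨hr, by simp [pvDesc], hjlt⟩]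
          simp [hr]
        · rw [if_neg (by intro h; exact hr (List.eq_nil_of_length_eq_zero h.2)),
            if_neg (by intro h; exact hr h.1)]
          simp [pvDesc]
      · have hstep : pvStepA cs cs.length ret j = ret := by
          rw [pvStepA, hgetD, if_neg hc, if_neg (by intro h; exact h1 h.1)]
        rw [hstep, ih (j + 1) _ (by omega), hdescj]
        have hjj : j + 1 < cs.length := by omega
        by_cases hr : ret = [] ∧ pvDesc (cs.drop (j + 1)) = []
        · rw [if_pos ⟨hr.1, hr.2, hjj⟩, if_pos ⟨hr.1, hr.2, hjlt⟩]
        · rw [if_neg (fun h => hr ⟨h.1, h.2.1⟩), if_neg (fun h => hr ⟨h.1, h.2.1⟩)]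

-- ===== VERDICT (by name: the statement is the Claim_ definition above) =====
theorem sipk5_bin_str_to_polinom_list_spec : Claim_equal_sipk5_bin_str_to_polinom_list := by
  intro s _
  unfold Spec_sipk5_bin_str_to_polinom_list sipk5_bin_str_to_polinom_list
    sipk5_bin_str_to_polinom_list_alt
  simp only []
  rw [List.range_eq_range', show (fun (ret : List String) i => if (s.toList.getD i ' ' = '1') then (if i = s.toList.length - 1 then ret ++ ["1"] else if i = s.toList.length - 2 then ret ++ ["x"] else ret ++ ["x^{" ++ PySem.Int.toStr (Int.ofNat (s.toList.length - i - 1)) ++ "}"]) else if i = s.toList.length - 1 ∧ ret.length = 0 then ret ++ ["0"] else ret) = pvStepA s.toList s.toList.length from rfl]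
  rw [pvFoldA s.toList s.toList.length 0 [] (by omega), List.drop_zero]
  have hout : pvBitsB (pvValB s.toList) = pvDesc s.toList := by
    rw [pvValB, pvValB_eq s.toList 0, zero_mul, zero_add, pvBitsB_val]
  rw [hout]
  have hlen : (0 < s.toList.length) = (s.toList ≠ []) := by
    simp only [eq_iff_iff]; exact List.length_pos_iff
  by_cases hz : pvDesc s.toList = [] ∧ s.toList ≠ []
  · rw [if_pos ⟨rfl, hz.1, by rw [hlen]; exact hz.2⟩, if_pos hz]
    simp [hz.1]
  · rw [if_neg (by intro h; exact hz ⟨h.2.1, by rw [← hlen]; exact h.2.2⟩), if_neg hz]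
    simp
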